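-- pv_equiv track=rewrite | github.com/mariodiaz1375/tp2-taller-prog | ejercicio5.py | ejercicio5
-- ===== SOURCE A (Python) =====
-- def ejercicio5(lista):
--     lista_b = []
--     for num in lista:
--         aux = abs(int(num))
--         dig_par = 0
--         dig_impar = 0
--         while aux > 0:
--             dig = aux%10
--             aux = aux//10
--             if dig%2 == 0:
--                 dig_par += 1
--             else:
--                 dig_impar += 1
--         if dig_par == 2 and dig_impar >= 2:
--             lista_b.append(num)
--     return lista_b
-- ===== SOURCE B (Python) =====
-- def ejercicio5(lista):
--     def ok(num):
--         s = str(abs(int(num)))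
--         even = sum(map(s.count, "02468"))
--         return even == 2 and len(s) - even >= 2
--     return [num for num in lista if ok(num)]
-- ===== Notes on version B (the rewrite author's own statement) =====
-- stated objective: idiomatic
-- what changed: Replaces the arithmetic digit-peeling while-loop and the two explicit counters with a string-based list comprehension: the even-digit count is obtained by summing str.count over '02468' on str(abs(num)) and the odd count is derived as len minus even.
import Mathlib
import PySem

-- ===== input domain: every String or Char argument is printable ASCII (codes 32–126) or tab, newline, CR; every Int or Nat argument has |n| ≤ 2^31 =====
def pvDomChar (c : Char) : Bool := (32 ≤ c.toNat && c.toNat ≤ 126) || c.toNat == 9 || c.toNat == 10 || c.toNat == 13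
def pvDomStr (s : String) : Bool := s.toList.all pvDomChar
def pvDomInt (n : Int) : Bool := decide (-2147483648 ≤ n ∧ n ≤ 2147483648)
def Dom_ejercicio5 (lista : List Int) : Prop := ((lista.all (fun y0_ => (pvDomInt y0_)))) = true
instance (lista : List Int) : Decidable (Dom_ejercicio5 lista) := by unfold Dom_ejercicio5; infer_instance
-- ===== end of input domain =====

-- B replaces A's arithmetic digit-peeling while-loop with a string-based list
-- comprehension (str.count over '02468' on str(abs(num))); same cost, more idiomatic.


-- ===== PORT A =====
-- the `while aux > 0` loop; aux = abs(int(num)) is nonnegative, kept as a Nat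
def ejercicio5Loop (aux digPar digImpar : Nat) : Nat × Nat :=
  if _h : 0 < aux then
    let dig := aux % 10
    let aux' := aux / 10
    if dig % 2 = 0 then ejercicio5Loop aux' (digPar + 1) digImpar
    else ejercicio5Loop aux' digPar (digImpar + 1)
  else (digPar, digImpar)
termination_by aux
decreasing_by all_goals exact Nat.div_lt_self _h (by norm_num)

def ejercicio5 (lista : List Int) : List Int :=
  lista.foldl (fun listaB num =>
    let r := ejercicio5Loop num.natAbs 0 0
    if r.1 = 2 ∧ 2 ≤ r.2 then listaB ++ [num] else listaB) []

-- ===== PORT B =====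
def ejercicio5AltOk (num : Int) : Bool :=
  let cs := (PySem.Int.toStr (num.natAbs : Int)).toList   -- s = str(abs(int(num)))
  let even := (['0', '2', '4', '6', '8'].map (fun d => cs.count d)).sum  -- sum(map(s.count, "02468"))
  decide (even = 2 ∧ 2 ≤ (cs.length : Int) - (even : Int))

def ejercicio5_alt (lista : List Int) : List Int :=
  lista.filter ejercicio5AltOk

-- ===== PRECONDITION & SPEC =====
def Spec_ejercicio5 (lista : List Int) (out : List Int) : Prop := out = ejercicio5_alt lista
instance (lista : List Int) (out : List Int) : Decidable (Spec_ejercicio5 lista out) := by unfold Spec_ejercicio5; infer_instance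

-- ===== CLAIM (what is proved, stated in full; the proofs are below) =====
def Claim_equal_ejercicio5 : Prop := ∀ (lista : List Int), Dom_ejercicio5 lista → Spec_ejercicio5 lista (ejercicio5 lista)

-- ===== LEMMAS AND PROOFS =====

-- decimal digit characters of n, most significant first (the shape Nat.toDigits produces)
def digsRev (n : Nat) : List Char :=
  if _h : n / 10 = 0 then [Nat.digitChar (n % 10)]
  else digsRev (n / 10) ++ [Nat.digitChar (n % 10)]
termination_by n
decreasing_by exact Nat.div_lt_self (by omega) (by norm_num)

def evCh (c : Char) : Bool := ['0', '2', '4', '6', '8'].contains c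

theorem toDigitsCore_eq_digsRev : ∀ (f n : Nat) (acc : List Char), 0 < f → n < 10 ^ f →
    Nat.toDigitsCore 10 f n acc = digsRev n ++ acc := by
  intro f
  induction f with
  | zero => intro n acc h; omega
  | succ f ih =>
    intro n acc _ hlt
    rw [Nat.toDigitsCore, digsRev]
    by_cases h : n / 10 = 0
    · simp [h]
    · have h10 : 10 ≤ n := by
        by_contra hc
        exact h (Nat.div_eq_of_lt (by omega))
      have hfpos : 0 < f := by
        rcases Nat.eq_zero_or_pos f with hf | hf
        · subst hf; simp at hlt; omega
        · exact hf
      have hdiv : n / 10 < 10 ^ f := by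
        rw [Nat.div_lt_iff_lt_mul (by norm_num)]
        calc n < 10 ^ (f + 1) := hlt
          _ = 10 ^ f * 10 := by ring
      simp only [h, if_false]
      rw [ih (n / 10) (Nat.digitChar (n % 10) :: acc) hfpos hdiv]
      simp

theorem toDigits_eq_digsRev (n : Nat) : Nat.toDigits 10 n = digsRev n := by
  rw [Nat.toDigits]
  have h : n < 10 ^ (n + 1) :=
    lt_of_lt_of_le (Nat.lt_pow_self (by norm_num))
      (Nat.pow_le_pow_right (by norm_num) (Nat.le_succ n))
  rw [toDigitsCore_eq_digsRev (n + 1) n [] (Nat.succ_pos n) h, List.append_nil]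

theorem sumCount_eq_countP (cs : List Char) :
    (['0', '2', '4', '6', '8'].map (fun d => cs.count d)).sum = cs.countP evCh := by
  induction cs with
  | nil => decide
  | cons c cs ih =>
    simp only [List.map_cons, List.map_nil, List.sum_cons, List.sum_nil,
      List.count_cons, List.countP_cons] at *
    by_cases h0 : c = '0' <;> by_cases h2 : c = '2' <;> by_cases h4 : c = '4' <;>
      by_cases h6 : c = '6' <;> by_cases h8 : c = '8' <;>
      simp_all [evCh] <;> omega

theorem digitChar_ev (d : Nat) (h : d < 10) : evCh (Nat.digitChar d) = (d % 2 == 0) := by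
  interval_cases d <;> decide

theorem countP_le_len (cs : List Char) : cs.countP evCh ≤ cs.length :=
  List.countP_le_length

theorem loop_eq (n : Nat) (hn : 0 < n) : ∀ p q : Nat,
    ejercicio5Loop n p q =
      (p + (digsRev n).countP evCh, q + ((digsRev n).length - (digsRev n).countP evCh)) := by
  induction n using Nat.strong_induction_on with
  | _ n ih =>
    intro p q
    rw [ejercicio5Loop, digsRev]
    have hmod : n % 10 < 10 := Nat.mod_lt _ (by norm_num)
    have hev := digitChar_ev (n % 10) hmod
    by_cases h0 : n / 10 = 0
    · simp only [dif_pos hn, h0, dif_pos]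
      by_cases hpar : n % 10 % 2 = 0
      · rw [if_pos hpar, ejercicio5Loop]
        have hc : evCh (Nat.digitChar (n % 10)) = true := by rw [hev, beq_iff_eq]; exact hpar
        simp [hc]
      · rw [if_neg hpar, ejercicio5Loop]
        have hc : evCh (Nat.digitChar (n % 10)) = false := by
          rw [hev, beq_eq_false_iff_ne]; exact hpar
        simp [hc]
    · have hpos : 0 < n / 10 := Nat.pos_of_ne_zero h0
      have hlt : n / 10 < n := Nat.div_lt_self hn (by norm_num)
      have hEL := countP_le_len (digsRev (n / 10))
      have hL : (digsRev (n / 10) ++ [Nat.digitChar (n % 10)]).length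
          = (digsRev (n / 10)).length + 1 := by simp
      simp only [dif_pos hn, dif_neg h0]
      by_cases hpar : n % 10 % 2 = 0
      · rw [if_pos hpar, ih (n / 10) hlt hpos]
        have hc : evCh (Nat.digitChar (n % 10)) = true := by rw [hev, beq_iff_eq]; exact hpar
        have hE : (digsRev (n / 10) ++ [Nat.digitChar (n % 10)]).countP evCh
            = (digsRev (n / 10)).countP evCh + 1 := by
          simp [List.countP_append, hc]
        simp only [Prod.mk.injEq]
        constructor <;> omega
      · rw [if_neg hpar, ih (n / 10) hlt hpos]
        have hc : evCh (Nat.digitChar (n % 10)) = false := by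
          rw [hev, beq_eq_false_iff_ne]; exact hpar
        have hE : (digsRev (n / 10) ++ [Nat.digitChar (n % 10)]).countP evCh
            = (digsRev (n / 10)).countP evCh := by
          simp [List.countP_append, hc]
        simp only [Prod.mk.injEq]
        constructor <;> omega

set_option maxRecDepth 4000 in
theorem ok_eq (num : Int) :
    (decide ((ejercicio5Loop num.natAbs 0 0).1 = 2 ∧ 2 ≤ (ejercicio5Loop num.natAbs 0 0).2)) =
      ejercicio5AltOk num := by
  have h1 : (PySem.Int.toStr (num.natAbs : Int)).toList = digsRev num.natAbs := by
    rw [PySem.Int.toList_toStr]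
    unfold PySem.Int.toChars
    rw [if_neg (by omega), Int.toNat_natCast, toDigits_eq_digsRev]
  simp only [ejercicio5AltOk, h1, sumCount_eq_countP]
  rcases Nat.eq_zero_or_pos num.natAbs with h | h
  · rw [h]
    rw [ejercicio5Loop]
    simp [digsRev, evCh, Nat.digitChar]
  · rw [loop_eq num.natAbs h 0 0]
    have hEL := countP_le_len (digsRev num.natAbs)
    simp only [Nat.zero_add, decide_eq_decide]
    constructor <;> intro ⟨ha, hb⟩ <;> refine ⟨ha, ?_⟩ <;> omega

theorem foldl_eq_filter (l : List Int) : ∀ acc : List Int,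
    l.foldl (fun listaB num =>
      let r := ejercicio5Loop num.natAbs 0 0
      if r.1 = 2 ∧ 2 ≤ r.2 then listaB ++ [num] else listaB) acc
      = acc ++ l.filter ejercicio5AltOk := by
  induction l with
  | nil => intro acc; simp
  | cons x l ih =>
    intro acc
    simp only [List.foldl_cons, List.filter_cons]
    rw [← ok_eq x]
    by_cases h : ((ejercicio5Loop x.natAbs 0 0).1 = 2 ∧ 2 ≤ (ejercicio5Loop x.natAbs 0 0).2)
    · simp [h, ih]
    · simp [h, ih]

-- ===== VERDICT (by name: the statement is the Claim_ definition above) =====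
theorem ejercicio5_spec : Claim_equal_ejercicio5 := by
  intro lista _
  unfold Spec_ejercicio5 ejercicio5 ejercicio5_alt
  simpa using foldl_eq_filter lista []
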